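-- pv_equiv track=rewrite | github.com/rabruni/Brain_Garden | Control_Plane_v2/scripts/pkgutil.py | _extract_framework_title
-- ===== SOURCE A (Python) =====
-- def _extract_framework_title(content: str, framework_id: str) -> str:
--     """Extract title from framework markdown."""
--     lines = content.split('\n')
--     for line in lines:
--         if line.startswith('# '):
--             # Extract title, removing framework ID prefix if present
--             title = line[2:].strip()
--             if ':' in title:
--                 title = title.split(':', 1)[1].strip()
--             return title
--     return framework_id
-- ===== SOURCE B (Python) =====
-- def _extract_framework_title(content: str, framework_id: str) -> str:
--     """Extract title from framework markdown (single pass over a shrinking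
--     suffix via str.find, no line list is built; stops at the first heading)."""
--     rest = content
--     while True:
--         nl = rest.find('\n')
--         line = rest if nl == -1 else rest[:nl]
--         if line.startswith('# '):
--             title = line[2:].strip()
--             c = title.find(':')
--             if c != -1:
--                 title = title[c + 1:].strip()
--             return title
--         if nl == -1:
--             return framework_id
--         rest = rest[nl + 1:]
-- ===== Notes on version B (the rewrite author's own statement) =====
-- stated objective: alternative
-- what changed: B replaces split('\n')-into-a-list-then-loop (and split(':',1) indexing) with a single find/slice scan over a shrinking suffix that builds no line list and stops at the first heading.
import Mathlib
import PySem

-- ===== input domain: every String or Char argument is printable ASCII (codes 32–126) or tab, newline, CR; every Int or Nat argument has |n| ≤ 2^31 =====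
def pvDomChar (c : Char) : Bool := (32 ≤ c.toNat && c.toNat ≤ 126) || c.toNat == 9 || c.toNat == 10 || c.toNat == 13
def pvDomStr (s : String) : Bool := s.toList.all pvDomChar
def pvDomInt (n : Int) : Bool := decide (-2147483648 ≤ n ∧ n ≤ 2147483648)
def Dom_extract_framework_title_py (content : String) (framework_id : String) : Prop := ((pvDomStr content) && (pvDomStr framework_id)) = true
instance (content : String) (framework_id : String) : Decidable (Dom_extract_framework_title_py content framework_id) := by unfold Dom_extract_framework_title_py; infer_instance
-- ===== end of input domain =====

-- B replaces A's split-into-a-line-list-then-loop with a single find/slice scan over a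
-- shrinking suffix (objective: alternative; same O(n) cost, no line list is built).

-- ===== PORT A =====
-- title = line[2:].strip()   (common first step of both post-processings)
def pvTitle (line : List Char) : List Char :=
  PySem.Chars.strip (PySem.Chars.slice line (some 2) none)

-- A's tail: if ':' in title: title = title.split(':', 1)[1].strip()
def pvPostA (line : List Char) : List Char :=
  if PySem.Chars.isIn [':'] (pvTitle line) then
    PySem.Chars.strip ((PySem.Chars.splitOnMax (pvTitle line) [':'] 1).getD 1 [])
  else pvTitle line

-- A's loop: for line in lines: if line.startswith('# '): return <post>; after the loop: return framework_id
def pvLinesLoopA (lines : List (List Char)) (fid : List Char) : List Char :=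
  match lines with
  | [] => fid
  | line :: rest =>
    if PySem.Chars.startswith line ['#', ' '] then pvPostA line else pvLinesLoopA rest fid

def extract_framework_title_py (content : String) (framework_id : String) : String :=
  String.ofList (pvLinesLoopA (PySem.Chars.splitOn content.toList ['\n']) framework_id.toList)

-- ===== PORT B =====
-- B's tail: c = title.find(':'); if c != -1: title = title[c+1:].strip()
def pvPostB (line : List Char) : List Char :=
  if PySem.Chars.find (pvTitle line) [':'] ≠ -1 then
    PySem.Chars.strip (PySem.Chars.slice (pvTitle line) (some (PySem.Chars.find (pvTitle line) [':'] + 1)) none)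
  else pvTitle line

-- B's loop: nl = rest.find('\n'); line = rest if nl == -1 else rest[:nl]; …; rest = rest[nl+1:]
def pvScanB (rest : List Char) (fid : List Char) : List Char :=
  let nl := PySem.Chars.find rest ['\n']
  let line := if nl = -1 then rest else PySem.Chars.slice rest none (some nl)
  if PySem.Chars.startswith line ['#', ' '] then pvPostB line
  else if h : nl = -1 then fid
  else pvScanB (PySem.Chars.slice rest (some (nl + 1)) none) fid
termination_by rest.length
decreasing_by
  have h0 : (0:Int) ≤ PySem.Chars.find rest ['\n'] := by
    have := PySem.Chars.neg_one_le_find rest ['\n']; omega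
  have hne : rest ≠ [] := by
    intro hr
    have := (PySem.Chars.find_eq_neg_one_iff rest ['\n']).2
    subst hr
    simp [List.infix_iff_prefix_suffix] at this
    exact h this
  have hsl : PySem.Chars.slice rest (some (PySem.Chars.find rest ['\n'] + 1)) none
       = rest.drop (PySem.Chars.find rest ['\n'] + 1).toNat := by
    simpa [PySem.Chars.slice_eq_listSlice] using
      PySem.List.slice_from rest (a := PySem.Chars.find rest ['\n'] + 1) (by omega)
  rw [hsl]
  have hlen : 0 < rest.length := List.length_pos_iff.2 hne
  simp [List.length_drop]; omega

def extract_framework_title_py_alt (content : String) (framework_id : String) : String :=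
  String.ofList (pvScanB content.toList framework_id.toList)

-- ===== PRECONDITION & SPEC =====
def Spec_extract_framework_title_py (content : String) (framework_id : String) (out : String) : Prop := out = extract_framework_title_py_alt content framework_id
instance (content : String) (framework_id : String) (out : String) : Decidable (Spec_extract_framework_title_py content framework_id out) := by unfold Spec_extract_framework_title_py; infer_instance

-- ===== CLAIM (what is proved, stated in full; the proofs are below) =====
def Claim_equal_extract_framework_title_py : Prop := ∀ (content : String) (framework_id : String), Dom_extract_framework_title_py content framework_id → Spec_extract_framework_title_py content framework_id (extract_framework_title_py content framework_id)

-- ===== LEMMAS AND PROOFS =====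

-- prepend a chunk to the head piece of a split (the accumulator shape of CPython's split loop)
def pvConsHead (p : List Char) : List (List Char) → List (List Char)
  | [] => [p]
  | l :: ls => (p ++ l) :: ls

-- structural form of s.split(c) for a single-character separator
def pvSplitC (c : Char) : List Char → List (List Char)
  | [] => [[]]
  | x :: xs => if x = c then [] :: pvSplitC c xs else pvConsHead [x] (pvSplitC c xs)

-- structural form of s.split(c, 1)
def pvSplit1 (c : Char) : List Char → List (List Char)
  | [] => [[]]
  | x :: xs => if x = c then [[], xs] else pvConsHead [x] (pvSplit1 c xs)

theorem pvConsHead_append (p q : List Char) (ls : List (List Char)) :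
    pvConsHead (p ++ q) ls = pvConsHead p (pvConsHead q ls) := by
  cases ls <;> simp [pvConsHead]

theorem pvSplitC_ne_nil (c : Char) (l : List Char) : pvSplitC c l ≠ [] := by
  cases l with
  | nil => simp [pvSplitC]
  | cons x xs =>
    simp only [pvSplitC]
    split_ifs
    · simp
    · cases h : pvSplitC c xs <;> simp [pvConsHead]

theorem pvSplit1_ne_nil (c : Char) (l : List Char) : pvSplit1 c l ≠ [] := by
  cases l with
  | nil => simp [pvSplit1]
  | cons x xs =>
    simp only [pvSplit1]
    split_ifs
    · simp
    · cases h : pvSplit1 c xs <;> simp [pvConsHead]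

theorem pvConsHead_nil {z : List (List Char)} (h : z ≠ []) : pvConsHead [] z = z := by
  cases z with
  | nil => exact absurd rfl h
  | cons l ls => simp [pvConsHead]

theorem pvSingleton_prefix_iff (c : Char) (l : List Char) : ([c] <+: l) ↔ l.head? = some c := by
  cases l <;> simp [List.cons_prefix_iff]

theorem pvSplitOn_go_eq (c : Char) :
    ∀ (fuel : Nat) (l cur : List Char) (acc : List (List Char)), l.length ≤ fuel →
      PySem.Chars.splitOn.go [c] fuel l cur acc = acc.reverse ++ pvConsHead cur.reverse (pvSplitC c l) := by
  intro fuel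
  induction fuel with
  | zero =>
    intro l cur acc hl
    have : l = [] := by cases l <;> simp_all
    subst this
    simp [PySem.Chars.splitOn.go, pvSplitC, pvConsHead]
  | succ fuel ih =>
    intro l cur acc hl
    cases l with
    | nil => simp [PySem.Chars.splitOn.go, pvSplitC, pvConsHead]
    | cons x xs =>
      by_cases hx : x = c
      · subst hx
        have hpre : List.isPrefixOf [x] (x :: xs) = true := by
          simp [List.isPrefixOf]
        have hd : List.drop [x].length (x :: xs) = xs := rfl
        rw [PySem.Chars.splitOn.go]
        simp only [hpre, if_pos, hd]
        rw [ih xs [] (cur.reverse :: acc) (by simpa using Nat.le_of_succ_le_succ hl)]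
        simp [pvSplitC, pvConsHead]
        cases hsp : pvSplitC x xs with
        | nil => exact absurd hsp (pvSplitC_ne_nil x xs)
        | cons l ls => rfl
      · have hpre : List.isPrefixOf [c] (x :: xs) = false := by
          simp [List.isPrefixOf]; exact fun h => absurd h.symm hx
        rw [PySem.Chars.splitOn.go]
        simp only [hpre, Bool.false_eq_true, if_false]
        rw [ih xs (x :: cur) acc (by simpa using Nat.le_of_succ_le_succ hl)]
        simp only [pvSplitC, if_neg hx]
        rw [List.reverse_cons, pvConsHead_append]

theorem pvSplitOn_eq (c : Char) (cs : List Char) :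
    PySem.Chars.splitOn cs [c] = pvSplitC c cs := by
  unfold PySem.Chars.splitOn
  rw [pvSplitOn_go_eq c (cs.length + 1) cs [] [] (by omega)]
  simpa using pvConsHead_nil (pvSplitC_ne_nil c cs)

theorem pvSplitOnMax_go_zero (sep : List Char) :
    ∀ (fuel : Nat) (l cur : List Char) (acc : List (List Char)),
      PySem.Chars.splitOnMax.go sep fuel 0 l cur acc = acc.reverse ++ [cur.reverse ++ l] := by
  intro fuel l cur acc
  cases fuel <;> cases l <;> simp [PySem.Chars.splitOnMax.go]

theorem pvSplitOnMax_go_one (c : Char) :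
    ∀ (fuel : Nat) (l cur : List Char) (acc : List (List Char)), l.length ≤ fuel →
      PySem.Chars.splitOnMax.go [c] fuel 1 l cur acc = acc.reverse ++ pvConsHead cur.reverse (pvSplit1 c l) := by
  intro fuel
  induction fuel with
  | zero =>
    intro l cur acc hl
    have : l = [] := by cases l <;> simp_all
    subst this
    simp [PySem.Chars.splitOnMax.go, pvSplit1, pvConsHead]
  | succ fuel ih =>
    intro l cur acc hl
    cases l with
    | nil => simp [PySem.Chars.splitOnMax.go, pvSplit1, pvConsHead]
    | cons x xs =>
      by_cases hx : x = c
      · subst hx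
        have hpre : List.isPrefixOf [x] (x :: xs) = true := by simp [List.isPrefixOf]
        have hd : List.drop [x].length (x :: xs) = xs := rfl
        have hm : (1:Nat) - 1 = 0 := rfl
        rw [PySem.Chars.splitOnMax.go]
        simp only [hpre, if_pos, Nat.one_ne_zero, if_false, hd, hm]
        rw [pvSplitOnMax_go_zero]
        simp [pvSplit1, pvConsHead]
      · have hpre : List.isPrefixOf [c] (x :: xs) = false := by
          simp [List.isPrefixOf]; exact fun h => absurd h.symm hx
        rw [PySem.Chars.splitOnMax.go]
        simp only [hpre, Bool.false_eq_true, if_false, Nat.one_ne_zero]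
        rw [ih xs (x :: cur) acc (by simpa using Nat.le_of_succ_le_succ hl)]
        simp only [pvSplit1, if_neg hx]
        rw [List.reverse_cons, pvConsHead_append]

theorem pvSplitOnMax_eq (c : Char) (cs : List Char) :
    PySem.Chars.splitOnMax cs [c] 1 = pvSplit1 c cs := by
  unfold PySem.Chars.splitOnMax
  rw [if_neg (by norm_num)]
  have h1 : ((1:Int)).toNat = 1 := rfl
  rw [h1, pvSplitOnMax_go_one c (cs.length + 1) cs [] [] (by omega)]
  simpa using pvConsHead_nil (pvSplit1_ne_nil c cs)

-- first-occurrence facts of s.find(c)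
theorem pvFind_facts (c : Char) (cs : List Char) (h : PySem.Chars.find cs [c] ≠ -1) :
    (PySem.Chars.find cs [c]).toNat < cs.length ∧
    cs[(PySem.Chars.find cs [c]).toNat]? = some c ∧
    ∀ i < (PySem.Chars.find cs [c]).toNat, cs[i]? ≠ some c := by
  have h0 : (0:Int) ≤ PySem.Chars.find cs [c] := by
    have := PySem.Chars.neg_one_le_find cs [c]; omega
  obtain ⟨hp, hmin⟩ := PySem.Chars.find_spec h0
  have hget : cs[(PySem.Chars.find cs [c]).toNat]? = some c := by
    have := (pvSingleton_prefix_iff c _).1 hp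
    rwa [List.head?_drop] at this
  obtain ⟨hk, -⟩ := List.getElem?_eq_some_iff.1 hget
  refine ⟨hk, hget, ?_⟩
  intro i hi hic
  exact hmin i hi ((pvSingleton_prefix_iff c _).2 (by rwa [List.head?_drop]))

theorem pvFind_eq_neg_one_iff_not_mem (c : Char) (cs : List Char) :
    PySem.Chars.find cs [c] = -1 ↔ c ∉ cs := by
  rw [PySem.Chars.find_eq_neg_one_iff, List.singleton_infix_iff]

theorem pvSplitC_of_not_mem (c : Char) (cs : List Char) (h : c ∉ cs) : pvSplitC c cs = [cs] := by
  induction cs with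
  | nil => rfl
  | cons x xs ih =>
    have hx : x ≠ c := fun hxc => h (hxc ▸ List.mem_cons_self)
    have hxs : c ∉ xs := fun hm => h (List.mem_cons_of_mem _ hm)
    simp [pvSplitC, hx, ih hxs, pvConsHead]

theorem pvSplitC_of_first (c : Char) :
    ∀ (cs : List Char) (k : Nat), cs[k]? = some c → (∀ i < k, cs[i]? ≠ some c) →
      pvSplitC c cs = cs.take k :: pvSplitC c (cs.drop (k + 1)) := by
  intro cs
  induction cs with
  | nil => intro k hk _; simp at hk
  | cons x xs ih =>
    intro k hk hmin
    cases k with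
    | zero =>
      simp at hk
      subst hk
      simp [pvSplitC]
    | succ k' =>
      have hx : x ≠ c := by
        intro hxc
        exact hmin 0 (Nat.succ_pos _) (by simp [hxc])
      have hk' : xs[k']? = some c := by simpa using hk
      have hmin' : ∀ i < k', xs[i]? ≠ some c := by
        intro i hi
        have := hmin (i + 1) (by omega)
        simpa using this
      simp only [pvSplitC, if_neg hx, ih k' hk' hmin']
      simp [pvConsHead]

theorem pvSplit1_of_first (c : Char) :
    ∀ (cs : List Char) (k : Nat), cs[k]? = some c → (∀ i < k, cs[i]? ≠ some c) →
      pvSplit1 c cs = [cs.take k, cs.drop (k + 1)] := by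
  intro cs
  induction cs with
  | nil => intro k hk _; simp at hk
  | cons x xs ih =>
    intro k hk hmin
    cases k with
    | zero =>
      simp at hk
      subst hk
      simp [pvSplit1]
    | succ k' =>
      have hx : x ≠ c := by
        intro hxc
        exact hmin 0 (Nat.succ_pos _) (by simp [hxc])
      have hk' : xs[k']? = some c := by simpa using hk
      have hmin' : ∀ i < k', xs[i]? ≠ some c := by
        intro i hi
        have := hmin (i + 1) (by omega)
        simpa using this
      simp only [pvSplit1, if_neg hx, ih k' hk' hmin']
      simp [pvConsHead]

-- the two post-processings agree
theorem pvPost_eq (line : List Char) : pvPostA line = pvPostB line := by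
  unfold pvPostA pvPostB
  generalize pvTitle line = title
  by_cases h : PySem.Chars.find title [':'] = -1
  · have hnm : ':' ∉ title := (pvFind_eq_neg_one_iff_not_mem ':' title).1 h
    have hisin : PySem.Chars.isIn [':'] title = false := by
      rw [← Bool.not_eq_true, PySem.Chars.isIn_iff_infix, List.singleton_infix_iff]
      exact hnm
    simp [hisin, h]
  · obtain ⟨hlt, hget, hmin⟩ := pvFind_facts ':' title h
    have h0 : (0:Int) ≤ PySem.Chars.find title [':'] := by
      have := PySem.Chars.neg_one_le_find title [':']; omega
    have hmem : ':' ∈ title := by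
      obtain ⟨hh, hgete⟩ := List.getElem?_eq_some_iff.1 hget
      exact hgete ▸ List.getElem_mem hh
    have hisin : PySem.Chars.isIn [':'] title = true := by
      rw [PySem.Chars.isIn_iff_infix, List.singleton_infix_iff]
      exact hmem
    have hslice : PySem.List.slice title (some (PySem.Chars.find title [':'] + 1)) none
        = title.drop ((PySem.Chars.find title [':']).toNat + 1) := by
      rw [PySem.List.slice_from title (a := PySem.Chars.find title [':'] + 1) (by omega)]
      congr 1
      omega
    rw [pvSplitOnMax_eq, pvSplit1_of_first ':' title _ hget hmin]
    simp [hisin, h, hslice]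

-- the two loops agree
theorem pvLoop_eq : ∀ (n : Nat) (cs : List Char), cs.length < n → ∀ (fid : List Char),
    pvLinesLoopA (pvSplitC '\n' cs) fid = pvScanB cs fid := by
  intro n
  induction n with
  | zero => intro cs h; omega
  | succ n ih =>
    intro cs hlen fid
    by_cases h : PySem.Chars.find cs ['\n'] = -1
    · have hnm : '\n' ∉ cs := (pvFind_eq_neg_one_iff_not_mem '\n' cs).1 h
      rw [pvSplitC_of_not_mem '\n' cs hnm, pvScanB]
      simp only [pvLinesLoopA, h]
      by_cases hs : PySem.Chars.startswith cs ['#', ' '] = true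
      · simp [hs, pvPost_eq]
      · simp [hs]
    · obtain ⟨hlt, hget, hmin⟩ := pvFind_facts '\n' cs h
      have h0 : (0:Int) ≤ PySem.Chars.find cs ['\n'] := by
        have := PySem.Chars.neg_one_le_find cs ['\n']; omega
      have hline : PySem.Chars.slice cs none (some (PySem.Chars.find cs ['\n'])) =
          cs.take (PySem.Chars.find cs ['\n']).toNat := by
        rw [PySem.Chars.slice_eq_listSlice]
        exact PySem.List.slice_to cs h0
      have hrest : PySem.Chars.slice cs (some (PySem.Chars.find cs ['\n'] + 1)) none =
          cs.drop ((PySem.Chars.find cs ['\n']).toNat + 1) := by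
        have := PySem.List.slice_from cs (a := PySem.Chars.find cs ['\n'] + 1) (by omega)
        rw [PySem.Chars.slice_eq_listSlice, this]
        congr 1
        omega
      rw [pvSplitC_of_first '\n' cs _ hget hmin, pvScanB]
      simp only [pvLinesLoopA, h, hline, hrest]
      by_cases hs : PySem.Chars.startswith (cs.take (PySem.Chars.find cs ['\n']).toNat) ['#', ' '] = true
      · simp [hs, pvPost_eq]
      · simp only [hs, Bool.false_eq_true, if_false]
        exact ih (cs.drop ((PySem.Chars.find cs ['\n']).toNat + 1)) (by simp [List.length_drop]; omega) fid

-- ===== VERDICT (by name: the statement is the Claim_ definition above) =====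
theorem extract_framework_title_py_spec : Claim_equal_extract_framework_title_py := by
  intro content framework_id _
  show extract_framework_title_py content framework_id = extract_framework_title_py_alt content framework_id
  unfold extract_framework_title_py extract_framework_title_py_alt
  congr 1
  rw [pvSplitOn_eq]
  exact pvLoop_eq (content.toList.length + 1) content.toList (by omega) framework_id.toList
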